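-- pv_equiv track=rewrite | github.com/joey5678/body_scan_rest_srv | py/rule.py | find_classify_key
-- ===== SOURCE A (Python) =====
-- classify_dict = {
--     'ChengFen': [51, 53],
--     'FeiPang' : [11, 52, 25],
--     'WeiDu': [31, 32, 33, 34, 35, 36, 37, 38],
--     'BiLi' : [21, 22, 23, 24, 25],
--     'YiTai': [42, 41, 43, 44, 45],
--     'Overall': [12]
-- }
--
-- def find_classify_key(item_id):
--     res = []
--     types = []
--     for _k, _v in classify_dict.items():
--         if item_id in _v:
--             types.append(_v.index(item_id) + 1)
--             res.append(_k)
--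
--     return res, types
-- ===== SOURCE B (Python) =====
-- classify_dict = {
--     'ChengFen': [51, 53],
--     'FeiPang' : [11, 52, 25],
--     'WeiDu': [31, 32, 33, 34, 35, 36, 37, 38],
--     'BiLi' : [21, 22, 23, 24, 25],
--     'YiTai': [42, 41, 43, 44, 45],
--     'Overall': [12]
-- }
--
-- # Reverse index built once: value -> (keys, 1-based positions of first occurrence)
-- _index = {}
-- for _k, _v in classify_dict.items():
--     for _i, _val in enumerate(_v):
--         if _val not in _v[:_i]:          # keep only the first occurrence per list
--             keys, pos = _index.setdefault(_val, ([], []))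
--             keys.append(_k)
--             pos.append(_i + 1)
--
-- def find_classify_key(item_id):
--     keys, pos = _index.get(item_id, ([], []))
--     return list(keys), list(pos)
-- ===== Notes on version B (the rewrite author's own statement) =====
-- stated objective: idiomatic
-- what changed: A scans every dict entry per call, running 'in' plus list.index on each list; B precomputes a reverse index (value -> keys and positions) once at module scope and each call is a single dict lookup returning fresh copies.
import Mathlib
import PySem

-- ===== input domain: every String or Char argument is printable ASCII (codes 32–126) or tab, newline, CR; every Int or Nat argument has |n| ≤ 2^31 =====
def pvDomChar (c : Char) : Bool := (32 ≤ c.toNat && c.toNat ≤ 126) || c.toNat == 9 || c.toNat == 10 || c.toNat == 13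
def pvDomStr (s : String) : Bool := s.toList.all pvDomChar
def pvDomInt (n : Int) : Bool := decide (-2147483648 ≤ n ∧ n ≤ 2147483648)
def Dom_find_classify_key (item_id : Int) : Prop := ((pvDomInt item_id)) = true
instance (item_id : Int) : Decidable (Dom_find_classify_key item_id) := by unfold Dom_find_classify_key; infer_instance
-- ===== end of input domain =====

-- B replaces A's per-call scan of every dict entry by a reverse index (value -> keys, positions)
-- built once at module scope, so each call is a single lookup (objective: idiomatic).

-- ===== PORT A =====
def classify_dict : List (String × List Int) :=
  [("ChengFen", [51, 53]),
   ("FeiPang", [11, 52, 25]),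
   ("WeiDu", [31, 32, 33, 34, 35, 36, 37, 38]),
   ("BiLi", [21, 22, 23, 24, 25]),
   ("YiTai", [42, 41, 43, 44, 45]),
   ("Overall", [12])]

def find_classify_key (item_id : Int) : List String × List Int :=
  -- for _k, _v in classify_dict.items(): if item_id in _v: types.append(index+1); res.append(_k)
  classify_dict.foldl
    (fun (st : List String × List Int) kv =>
      if item_id ∈ kv.2 then
        match PySem.List.index? kv.2 item_id with
        | some j => (st.1 ++ [kv.1], st.2 ++ [(j : Int) + 1])
        | none => st    -- unreachable: item_id ∈ kv.2
      else st)
    ([], [])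

-- ===== PORT B =====
-- module-scope reverse index: value -> (keys, 1-based positions of first occurrence)
def pv_index : PySem.Dict Int (List String × List Int) :=
  classify_dict.foldl
    (fun d kv =>
      (PySem.List.enumerate kv.2).foldl
        (fun d iv =>
          if iv.2 ∈ PySem.List.slice kv.2 none (some iv.1) then d
          else
            let cur := d.getD iv.2 ([], [])
            d.insert iv.2 (cur.1 ++ [kv.1], cur.2 ++ [iv.1 + 1]))
        d)
    PySem.Dict.empty

def find_classify_key_alt (item_id : Int) : List String × List Int :=
  let p := pv_index.getD item_id ([], [])
  (p.1, p.2)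

-- ===== PRECONDITION & SPEC =====
def Spec_find_classify_key (item_id : Int) (out : List String × List Int) : Prop := out = find_classify_key_alt item_id
instance (item_id : Int) (out : List String × List Int) : Decidable (Spec_find_classify_key item_id out) := by unfold Spec_find_classify_key; infer_instance

-- ===== CLAIM (what is proved, stated in full; the proofs are below) =====
def Claim_equal_find_classify_key : Prop := ∀ (item_id : Int), Dom_find_classify_key item_id → Spec_find_classify_key item_id (find_classify_key item_id)

-- ===== LEMMAS AND PROOFS =====
-- every value occurring in classify_dict
def pvAllVals : List Int :=
  [51, 53, 11, 52, 25, 31, 32, 33, 34, 35, 36, 37, 38, 21, 22, 23, 24, 42, 41, 43, 44, 45, 12]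

theorem pv_find_none {α : Type} {i : Int} {l : List (Int × α)} {d : α}
    (h : ∀ x ∈ l, x.1 ≠ i) : ((l.find? (fun p => p.1 == i)).map (·.2)).getD d = d := by
  rw [List.find?_eq_none.mpr]
  · rfl
  · intro x hx; simpa using h x hx

theorem pv_outside (i : Int) (h : i ∉ pvAllVals) :
    find_classify_key i = ([], []) ∧ find_classify_key_alt i = ([], []) := by
  simp only [pvAllVals, List.mem_cons, List.not_mem_nil, or_false] at h
  push Not at h
  obtain ⟨h1, h2, h3, h4, h5, h6, h7, h8, h9, h10, h11, h12, h13, h14, h15, h16, h17, h18, h19, h20, h21, h22, h23⟩ := h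
  constructor
  · simp [find_classify_key, classify_dict, h1, h2, h3, h4, h5, h6, h7, h8, h9, h10, h11,
      h12, h13, h14, h15, h16, h17, h18, h19, h20, h21, h22, h23]
  · simp [find_classify_key_alt, pv_index, classify_dict, PySem.Dict.getD, PySem.Dict.get?,
      PySem.List.enumerate, PySem.List.slice, PySem.Dict.insert, PySem.Dict.empty]
    exact pv_find_none (by intro x hx; fin_cases hx <;> simp <;> omega)

-- ===== VERDICT (by name: the statement is the Claim_ definition above) =====
theorem find_classify_key_spec : Claim_equal_find_classify_key := by
  intro i _
  unfold Spec_find_classify_key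
  by_cases h : i ∈ pvAllVals
  · fin_cases h <;> decide
  · obtain ⟨ha, hb⟩ := pv_outside i h
    rw [ha, hb]
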